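-- pv_equiv track=rewrite | github.com/icmurray/jem-data | jem_data/core/modbus.py | split_registers
-- ===== SOURCE A (Python) =====
-- _VALID_REGISTER_RANGE = 125
--
-- def split_registers(registers):
--     """
--     Splits the given registers into multiple register dicts which all have
--     a valid modbus register range (of <= 125).
--     """
--
--     for width in registers.values():
--         if width > _VALID_REGISTER_RANGE:
--             raise ValueError("Invalid register width: %d" % width)
--
--     working_copy = registers.copy()
--     valid_registers = []
--
--     current_range_start = min(working_copy.keys())
--     current_range_end   = current_range_start + _VALID_REGISTER_RANGE
--
--     while working_copy:
--         current_range = dict(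
--             (addr, width) for addr, width in working_copy.items() \
--                 if current_range_start <= addr and \
--                    addr + width <= current_range_end
--         )
--
--         valid_registers.append(current_range)
--         for addr in current_range:
--             working_copy.pop(addr)
--
--         if working_copy:
--             current_range_start = min(working_copy.keys())
--             current_range_end   = current_range_start + _VALID_REGISTER_RANGE
--
--     return valid_registers
-- ===== SOURCE B (Python) =====
-- _VALID_REGISTER_RANGE = 125
--
-- def split_registers(registers):
--     """
--     Split the registers into dicts that each fit a valid modbus register
--     range (<= 125): one sort by register end + prefix minima of addresses,
--     a single pointer sweep to find the window starts and each register's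
--     window, then one bucketing pass in original insertion order.
--     """
--     limit = _VALID_REGISTER_RANGE
--     for width in registers.values():
--         if width > limit:
--             raise ValueError("Invalid register width: %d" % width)
--
--     items = list(registers.items())
--
--     # Registers sorted by descending end (= addr + width), with prefix
--     # minima of the addresses: prefmin[i] = smallest address in desc[:i+1].
--     desc = sorted(items, key=lambda item: item[0] + item[1], reverse=True)
--     prefmin = []
--     for i, (addr, _) in enumerate(desc):
--         prefmin.append(addr if i == 0 else min(addr, prefmin[i - 1]))
--
--     # Pointer sweep: desc[:p] are exactly the registers fitting no window
--     # found so far; the next window starts at their smallest address and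
--     # swallows a suffix of desc[:p].
--     starts = []
--     window_of = {}
--     p = len(desc)
--     while p > 0:
--         s = prefmin[p - 1]
--         starts.append(s)
--         while p > 0 and desc[p - 1][0] + desc[p - 1][1] <= s + limit:
--             p -= 1
--             window_of[desc[p][0]] = len(starts) - 1
--
--     # Bucket the registers into their windows, in original insertion order.
--     groups = [dict() for _ in starts]
--     for addr, width in items:
--         groups[window_of[addr]][addr] = width
--     return groups
-- ===== Notes on version B (the rewrite author's own statement) =====
-- stated objective: faster
-- what changed: A repeatedly rescans and mutates a shrinking working dict (min() plus a full filtering pass per window); B sorts the registers once by end address, derives every window start from prefix minima with a single two-pointer sweep that also records each register's window, and buckets the registers in one final pass.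
import Mathlib
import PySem

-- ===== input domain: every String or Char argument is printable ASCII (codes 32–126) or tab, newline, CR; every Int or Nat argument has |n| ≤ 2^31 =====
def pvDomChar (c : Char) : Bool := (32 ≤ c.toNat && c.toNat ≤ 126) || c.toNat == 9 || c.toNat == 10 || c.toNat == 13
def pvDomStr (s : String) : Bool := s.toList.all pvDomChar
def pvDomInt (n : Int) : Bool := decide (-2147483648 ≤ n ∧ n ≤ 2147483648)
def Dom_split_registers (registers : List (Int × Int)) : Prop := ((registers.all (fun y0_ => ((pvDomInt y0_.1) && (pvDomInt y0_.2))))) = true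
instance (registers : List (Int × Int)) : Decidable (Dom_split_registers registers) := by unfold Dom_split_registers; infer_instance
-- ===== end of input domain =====

-- B replaces A's repeated min()+filter passes over a shrinking working dict by one sort by
-- register end plus prefix minima of addresses, a single pointer sweep finding every window
-- start and each register's window, and one bucketing pass (objective: faster).

-- ===== PORT A =====
-- one round of A's while-loop: take the minimum remaining address, collect everything
-- fitting its 125-wide window, pop those keys, recurse (fuel bounds the rounds).
def pvALoop : Nat → PySem.Dict Int Int → List (List (Int × Int))
  | 0, _ => []
  | fuel+1, wc =>
    match PySem.List.min? wc.keys (fun x => x) with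
    | none => []   -- working copy empty: while-loop exit (min() of the initial empty dict raises: outside Pre_)
    | some s =>
      let grp := wc.items.filter (fun p => decide (s ≤ p.1) && decide (p.1 + p.2 ≤ s + 125))
      let wc' := (grp.map (fun p => p.1)).foldl (fun d a => d.erase a) wc
      grp :: pvALoop fuel wc'

def split_registers (registers : List (Int × Int)) : List (List (Int × Int)) :=
  let d := PySem.Dict.ofList registers
  if d.values.any (fun w => decide (125 < w)) then []   -- "raise ValueError(...)": outside Pre_
  else pvALoop d.size d

-- ===== PORT B =====
-- prefmin.append(addr if i == 0 else min(addr, prefmin[i-1])): the accumulator carries the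
-- list built so far together with its last element (none while the list is empty).
def pvPrefStep (acc : List Int × Option Int) (q : Int × Int) : List Int × Option Int :=
  match acc.2 with
  | none => (acc.1 ++ [q.1], some q.1)
  | some m => (acc.1 ++ [min q.1 m], some (min q.1 m))

-- inner while-loop: pop registers fitting the current window off the end of desc[:p],
-- recording their window index j; desc[p] is in range at every call (comment: exact).
def pvInner (desc : List (Int × Int)) (t : Int) (j : Int) :
    Nat → PySem.Dict Int Int → Nat × PySem.Dict Int Int
  | 0, wof => (0, wof)
  | p+1, wof =>
      let q := desc.getD p (0, 0)
      if q.1 + q.2 ≤ t then pvInner desc t j p (wof.insert q.1 j)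
      else (p+1, wof)

-- outer while-loop: while p > 0 open the next window at prefmin[p-1] (fuel bounds the rounds).
def pvSweep (desc : List (Int × Int)) (prefmin : List Int) :
    Nat → Nat → List Int → PySem.Dict Int Int → List Int × PySem.Dict Int Int
  | 0, _, starts, wof => (starts, wof)
  | fuel+1, p, starts, wof =>
      if p = 0 then (starts, wof)
      else
        let s := prefmin.getD (p-1) 0          -- prefmin[p-1], in range
        let starts' := starts ++ [s]
        let r := pvInner desc (s + 125) ((starts'.length : Int) - 1) p wof
        pvSweep desc prefmin fuel r.1 starts' r.2

-- groups[window_of[addr]][addr] = width: one bucketing step (key present, index in range)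
def pvBucketStep (wof : PySem.Dict Int Int) (gs : List (PySem.Dict Int Int)) (q : Int × Int) :
    List (PySem.Dict Int Int) :=
  let k := (wof.getD q.1 0).toNat
  gs.set k ((gs.getD k PySem.Dict.empty).insert q.1 q.2)

def split_registers_alt (registers : List (Int × Int)) : List (List (Int × Int)) :=
  let d := PySem.Dict.ofList registers
  if d.values.any (fun w => decide (125 < w)) then []   -- "raise ValueError(...)": outside Pre_
  else
    let items := d.items
    let desc := PySem.List.sorted items (fun q => q.1 + q.2) true
    let prefmin := (desc.foldl pvPrefStep (([], none) : List Int × Option Int)).1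
    let r := pvSweep desc prefmin desc.length desc.length [] PySem.Dict.empty
    let groups0 : List (PySem.Dict Int Int) := r.1.map (fun _ => PySem.Dict.empty)
    let groups := items.foldl (pvBucketStep r.2) groups0
    groups.map (fun g => g.items)

-- ===== PRECONDITION & SPEC =====
-- Pre_ excludes exactly the inputs on which A raises: a register wider than 125
-- ("raise ValueError") and the empty dict (min() of an empty sequence raises ValueError).
def Pre_split_registers (registers : List (Int × Int)) : Prop :=
  registers ≠ [] ∧ ∀ p ∈ (PySem.Dict.ofList registers).items, p.2 ≤ 125
instance (registers : List (Int × Int)) : Decidable (Pre_split_registers registers) := by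
  unfold Pre_split_registers; infer_instance
def pvWitness_split_registers : (List (Int × Int)) := [(0, 10), (200, 5)]

def Spec_split_registers (registers : List (Int × Int)) (out : List (List (Int × Int))) : Prop :=
  out = split_registers_alt registers
instance (registers : List (Int × Int)) (out : List (List (Int × Int))) : Decidable (Spec_split_registers registers out) := by
  unfold Spec_split_registers; infer_instance

-- ===== CLAIM (what is proved, stated in full; the proofs are below) =====
def Claim_equal_split_registers : Prop := ∀ (registers : List (Int × Int)), Dom_split_registers registers → Pre_split_registers registers → Spec_split_registers registers (split_registers registers)

-- ===== LEMMAS AND PROOFS =====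

-- the minimum address of a register list (value of Python's min(keys))
def pvMinA (l : List (Int × Int)) : Option Int :=
  PySem.List.min? (l.map (fun p => p.1)) (fun x => x)

def pvFitb (s : Int) (q : Int × Int) : Bool := decide (q.1 + q.2 ≤ s + 125)

-- the sequence of window starts produced by the greedy process
def pvChain : Nat → List (Int × Int) → List Int
  | 0, _ => []
  | fuel+1, l =>
    match pvMinA l with
    | none => []
    | some s => s :: pvChain fuel (l.filter (fun q => !pvFitb s q))

-- A's rounds, working-copy represented as its items list
def pvRounds : Nat → List (Int × Int) → List (List (Int × Int))
  | 0, _ => []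
  | fuel+1, l =>
    match pvMinA l with
    | none => []
    | some s => l.filter (pvFitb s) :: pvRounds fuel (l.filter (fun q => !pvFitb s q))

-- the (relative) index of the round in which address a is removed
def pvRoundIdx : Nat → List (Int × Int) → Int → Option Nat
  | 0, _, _ => none
  | fuel+1, l, a =>
    match pvMinA l with
    | none => none
    | some s =>
      if a ∈ (l.filter (pvFitb s)).map (fun p => p.1) then some 0
      else (pvRoundIdx fuel (l.filter (fun q => !pvFitb s q)) a).map (· + 1)


-- ---------- generic helpers ----------

-- minimum address is determined by the multiset of addresses
theorem pv_minA_perm {l l' : List (Int × Int)} (h : l.Perm l') : pvMinA l = pvMinA l' := by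
  have hm := h.map (fun p : Int × Int => p.1)
  unfold pvMinA
  cases h1 : PySem.List.min? (l.map fun p => p.1) (fun x => x) with
  | none =>
    rw [PySem.List.min?_eq_none_iff] at h1
    have h2 : l'.map (fun p => p.1) = [] := by
      have hl := hm.length_eq
      rw [h1] at hl
      exact List.eq_nil_of_length_eq_zero hl.symm
    rw [(PySem.List.min?_eq_none_iff _ _).2 h2]
  | some m =>
    cases h2 : PySem.List.min? (l'.map fun p => p.1) (fun x => x) with
    | none =>
      rw [PySem.List.min?_eq_none_iff] at h2
      rw [h2] at hm
      have := List.eq_nil_of_length_eq_zero hm.length_eq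
      rw [(PySem.List.min?_eq_none_iff _ _).2 this] at h1
      exact absurd h1 (by simp)
    | some m' =>
      have hmem := PySem.List.min?_mem h1
      have hmem' := PySem.List.min?_mem h2
      have h3 := PySem.List.min?_isMin h1 m' (hm.mem_iff.2 hmem')
      have h4 := PySem.List.min?_isMin h2 m (hm.mem_iff.1 hmem)
      exact congrArg some (le_antisymm h3 h4)

theorem pv_minA_eq_none {l : List (Int × Int)} : pvMinA l = none ↔ l = [] := by
  unfold pvMinA
  rw [PySem.List.min?_eq_none_iff]
  simp

theorem pv_minA_isMin {l : List (Int × Int)} {s : Int} (h : pvMinA l = some s) :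
    ∀ q ∈ l, s ≤ q.1 := by
  intro q hq
  exact PySem.List.min?_isMin h q.1 (List.mem_map_of_mem hq)

theorem pv_minA_mem {l : List (Int × Int)} {s : Int} (h : pvMinA l = some s) :
    ∃ q ∈ l, q.1 = s := by
  have := PySem.List.min?_mem h
  obtain ⟨q, hq, hq1⟩ := List.mem_map.1 this
  exact ⟨q, hq, hq1⟩

theorem pv_chain_perm (fuel : Nat) {l l' : List (Int × Int)} (h : l.Perm l') :
    pvChain fuel l = pvChain fuel l' := by
  induction fuel generalizing l l' with
  | zero => rfl
  | succ fuel ih =>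
    simp only [pvChain]
    rw [pv_minA_perm h]
    cases hm : pvMinA l' with
    | none => rfl
    | some s =>
      simp only []
      rw [ih (h.filter _)]

theorem pv_roundIdx_perm (fuel : Nat) {l l' : List (Int × Int)} (h : l.Perm l') (a : Int) :
    pvRoundIdx fuel l a = pvRoundIdx fuel l' a := by
  induction fuel generalizing l l' with
  | zero => rfl
  | succ fuel ih =>
    simp only [pvRoundIdx]
    rw [pv_minA_perm h]
    cases hm : pvMinA l' with
    | none => rfl
    | some s =>
      simp only []
      have hmem : (a ∈ (l.filter (pvFitb s)).map (fun p => p.1))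
          ↔ (a ∈ (l'.filter (pvFitb s)).map (fun p => p.1)) :=
        ((h.filter _).map _).mem_iff
      by_cases hc : a ∈ (l'.filter (pvFitb s)).map (fun p => p.1)
      · rw [if_pos (hmem.2 hc), if_pos hc]
      · rw [if_neg (fun hx => hc (hmem.1 hx)), if_neg hc, ih (h.filter _)]

theorem pv_roundIdx_not_mem (fuel : Nat) (l : List (Int × Int)) (a : Int)
    (ha : a ∉ l.map (fun p => p.1)) : pvRoundIdx fuel l a = none := by
  induction fuel generalizing l with
  | zero => rfl
  | succ fuel ih =>
    simp only [pvRoundIdx]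
    cases hm : pvMinA l with
    | none => rfl
    | some s =>
      simp only []
      have h1 : a ∉ (l.filter (pvFitb s)).map (fun p => p.1) := by
        intro hx
        obtain ⟨q, hq, hq1⟩ := List.mem_map.1 hx
        exact ha (List.mem_map.2 ⟨q, List.mem_of_mem_filter hq, hq1⟩)
      rw [if_neg h1]
      have h2 : a ∉ (l.filter (fun q => !pvFitb s q)).map (fun p => p.1) := by
        intro hx
        obtain ⟨q, hq, hq1⟩ := List.mem_map.1 hx
        exact ha (List.mem_map.2 ⟨q, List.mem_of_mem_filter hq, hq1⟩)
      rw [ih _ h2]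
      rfl

-- every register is assigned a round, within fuel = length
theorem pv_roundIdx_total (fuel : Nat) (l : List (Int × Int))
    (hw : ∀ q ∈ l, q.2 ≤ 125) (hfuel : l.length ≤ fuel) (q : Int × Int) (hq : q ∈ l) :
    ∃ r, pvRoundIdx fuel l q.1 = some r ∧ r < (pvChain fuel l).length := by
  induction fuel generalizing l with
  | zero =>
    interval_cases hl : l.length
    · exact absurd hq (by simp [List.length_eq_zero_iff.1 hl])
  | succ fuel ih =>
    have hne : l ≠ [] := by rintro rfl; simp at hq
    cases hm : pvMinA l with
    | none => exact absurd (pv_minA_eq_none.1 hm) hne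
    | some s =>
      simp only [pvRoundIdx, pvChain, hm]
      by_cases hc : q.1 ∈ (l.filter (pvFitb s)).map (fun p => p.1)
      · exact ⟨0, by rw [if_pos hc], by simp⟩
      · rw [if_neg hc]
        have hqfit : pvFitb s q = false := by
          by_contra hx
          have : pvFitb s q = true := by
            cases hb : pvFitb s q
            · exact absurd hb hx
            · rfl
          exact hc (List.mem_map.2 ⟨q, List.mem_filter.2 ⟨hq, this⟩, rfl⟩)
        have hq' : q ∈ l.filter (fun q => !pvFitb s q) :=
          List.mem_filter.2 ⟨hq, by rw [hqfit]; rfl⟩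
        obtain ⟨q0, hq0, hq01⟩ := pv_minA_mem hm
        have hlt : (l.filter (fun q => !pvFitb s q)).length < l.length := by
          rw [List.length_filter_lt_length_iff_exists]
          refine ⟨q0, hq0, ?_⟩
          have : pvFitb s q0 = true := by
            unfold pvFitb
            have := hw q0 hq0
            simp only [decide_eq_true_eq]
            omega
          simp [this]
        have hw' : ∀ r ∈ l.filter (fun q => !pvFitb s q), r.2 ≤ 125 :=
          fun r hr => hw r (List.mem_of_mem_filter hr)
        obtain ⟨r, hr1, hr2⟩ := ih _ hw' (by omega) hq'
        exact ⟨r + 1, by rw [hr1]; rfl, by simpa using hr2⟩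

-- ---------- A-side ----------

theorem pv_minA_nil : pvMinA ([] : List (Int × Int)) = none := rfl

theorem pv_mem_filter_fst {l : List (Int × Int)} (hnd : (l.map (fun p => p.1)).Nodup)
    (P : (Int × Int) → Bool) {q : Int × Int} (hq : q ∈ l) :
    q.1 ∈ (l.filter P).map (fun p => p.1) ↔ P q = true := by
  constructor
  · intro hx
    obtain ⟨q', hq', hq1⟩ := List.mem_map.1 hx
    have hq'l := List.mem_of_mem_filter hq'
    have := List.inj_on_of_nodup_map hnd hq'l hq hq1
    rw [← this]
    exact (List.mem_filter.1 hq').2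
  · intro hP
    exact List.mem_map.2 ⟨q, List.mem_filter.2 ⟨hq, hP⟩, rfl⟩

theorem pv_erase_fold (ks : List Int) (d : PySem.Dict Int Int) :
    (ks.foldl (fun d a => d.erase a) d).items
      = d.items.filter (fun p => !(ks.contains p.1)) := by
  induction ks generalizing d with
  | nil => simp
  | cons a ks ih =>
    simp only [List.foldl_cons]
    rw [ih]
    show ((d.items.filter fun p => !(p.1 == a)).filter fun p => !(ks.contains p.1)) = _
    rw [List.filter_filter]
    apply List.filter_congr
    intro p _
    by_cases hpa : p.1 = a
    · simp [hpa]
    · simp [hpa]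

theorem pv_A_rounds (fuel : Nat) (wc : PySem.Dict Int Int)
    (hnd : (wc.items.map (fun p => p.1)).Nodup) :
    pvALoop fuel wc = pvRounds fuel wc.items := by
  induction fuel generalizing wc with
  | zero => rfl
  | succ fuel ih =>
    simp only [pvALoop, pvRounds]
    rw [show PySem.List.min? wc.keys (fun x => x) = pvMinA wc.items from rfl]
    cases hm : pvMinA wc.items with
    | none => rfl
    | some s =>
      simp only []
      have hgrp : wc.items.filter (fun p => decide (s ≤ p.1) && decide (p.1 + p.2 ≤ s + 125))
          = wc.items.filter (pvFitb s) := by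
        apply List.filter_congr
        intro p hp
        have h1 := pv_minA_isMin hm p hp
        simp [pvFitb, h1]
      rw [hgrp]
      have hitems' : (((wc.items.filter (pvFitb s)).map (fun p => p.1)).foldl
            (fun d a => d.erase a) wc).items
          = wc.items.filter (fun q => !pvFitb s q) := by
        rw [pv_erase_fold]
        apply List.filter_congr
        intro p hp
        have hmem := pv_mem_filter_fst hnd (pvFitb s) hp
        rw [List.contains_eq_mem]
        by_cases hP : pvFitb s p = true
        · simp [hmem.2 hP, hP]
        · have hPf : pvFitb s p = false := by
            cases hb : pvFitb s p
            · rfl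
            · exact absurd hb hP
          have hnm : p.1 ∉ (wc.items.filter (pvFitb s)).map (fun p => p.1) :=
            fun hx => hP (hmem.1 hx)
          simp [hnm, hPf]
      congr 1
      rw [ih _ (by
        rw [hitems']
        exact hnd.sublist (List.Sublist.map _ List.filter_sublist)), hitems']

theorem pv_rounds_filter (fuel : Nat) (l : List (Int × Int))
    (hnd : (l.map (fun p => p.1)).Nodup) :
    pvRounds fuel l = (List.range (pvChain fuel l).length).map
      (fun j => l.filter (fun q => decide (pvRoundIdx fuel l q.1 = some j))) := by
  induction fuel generalizing l with
  | zero => rfl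
  | succ fuel ih =>
    cases hm : pvMinA l with
    | none =>
      have hnil : l = [] := pv_minA_eq_none.1 hm
      subst hnil
      rfl
    | some s =>
      simp only [pvRounds, pvChain, hm, List.length_cons]
      rw [List.range_succ_eq_map, List.map_cons]
      congr 1
      · apply List.filter_congr
        intro q hq
        have hmem := pv_mem_filter_fst hnd (pvFitb s) hq
        simp only [pvRoundIdx, hm]
        by_cases hc : q.1 ∈ (l.filter (pvFitb s)).map (fun p => p.1)
        · rw [if_pos hc]
          simp [hmem.1 hc]
        · rw [if_neg hc]
          have hPf : pvFitb s q = false := by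
            cases hb : pvFitb s q
            · rfl
            · exact absurd (hmem.2 hb) hc
          rw [hPf]
          cases pvRoundIdx fuel (l.filter fun q => !pvFitb s q) q.1 <;> simp
      · have hnd' : ((l.filter (fun q => !pvFitb s q)).map (fun p => p.1)).Nodup :=
          hnd.sublist (List.Sublist.map _ List.filter_sublist)
        rw [ih _ hnd', List.map_map]
        apply List.map_congr_left
        intro j hj
        rw [List.filter_filter]
        apply List.filter_congr
        intro q hq
        have hmem := pv_mem_filter_fst hnd (pvFitb s) hq
        simp only [pvRoundIdx, hm]
        by_cases hb : pvFitb s q = true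
        · rw [if_pos (hmem.2 hb), hb]
          simp
        · have hPf : pvFitb s q = false := by
            cases hbb : pvFitb s q
            · rfl
            · exact absurd hbb hb
          rw [if_neg (fun hx => hb (hmem.1 hx)), hPf]
          cases pvRoundIdx fuel (l.filter fun q => !pvFitb s q) q.1 <;> simp [Nat.succ_eq_add_one]

-- ---------- B-side: prefix minima ----------

def pvPms (m : Int) : List (Int × Int) → List Int
  | [] => []
  | q :: t => min q.1 m :: pvPms (min q.1 m) t

theorem pv_pref_fold (l : List (Int × Int)) (acc : List Int) (m : Int) :
    l.foldl pvPrefStep (acc, some m)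
      = (acc ++ pvPms m l, some ((l.map (fun p => p.1)).foldl min m)) := by
  induction l generalizing acc m with
  | nil => simp [pvPms]
  | cons q t ih =>
    simp only [List.foldl_cons, pvPrefStep, pvPms]
    rw [ih]
    simp [List.append_assoc]
    rw [min_comm m q.1]

theorem pv_pms_getD (t : List (Int × Int)) (m : Int) (i : Nat) (h : i < t.length) :
    (pvPms m t).getD i 0 = ((t.take (i+1)).map (fun p => p.1)).foldl min m := by
  induction t generalizing m i with
  | nil => simp at h
  | cons q t ih =>
    cases i with
    | zero => simp [pvPms, min_comm]
    | succ i =>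
      simp only [pvPms, List.getD_cons_succ, List.take_succ_cons, List.map_cons,
        List.foldl_cons]
      rw [ih _ _ (by simpa using h)]
      congr 1
      exact min_comm _ _

theorem pv_prefmin_getD (desc : List (Int × Int)) (p : Nat) (hp : 0 < p) (hle : p ≤ desc.length) :
    pvMinA (desc.take p)
      = some (((desc.foldl pvPrefStep (([], none) : List Int × Option Int)).1).getD (p-1) 0) := by
  obtain ⟨n, rfl⟩ : ∃ n, p = n + 1 := ⟨p - 1, by omega⟩
  cases desc with
  | nil => simp at hle
  | cons q t =>
    have hfold : ((q :: t).foldl pvPrefStep (([], none) : List Int × Option Int)).1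
        = q.1 :: pvPms q.1 t := by
      simp only [List.foldl_cons, pvPrefStep]
      rw [pv_pref_fold]
      simp
    rw [hfold]
    have htake : (q :: t).take (n + 1) = q :: t.take n := by simp
    rw [htake]
    unfold pvMinA
    rw [List.map_cons, PySem.List.min?_id_cons]
    cases n with
    | zero => simp
    | succ m =>
      simp only [Nat.add_sub_cancel, List.getD_cons_succ]
      rw [pv_pms_getD t q.1 m (by simp at hle; omega)]

-- ---------- B-side: pointer sweep ----------

theorem pv_inner_spec (desc : List (Int × Int))
    (hdesc : desc.Pairwise (fun a b => b.1 + b.2 ≤ a.1 + a.2))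
    (s : Int) (j : Int) (p : Nat) (hp : p ≤ desc.length) (wof : PySem.Dict Int Int) :
    (pvInner desc (s + 125) j p wof).1 ≤ p ∧
    desc.take (pvInner desc (s + 125) j p wof).1 = (desc.take p).filter (fun q => !pvFitb s q) ∧
    ∀ a : Int, (pvInner desc (s + 125) j p wof).2.get? a =
      if a ∈ ((desc.take p).filter (pvFitb s)).map (fun q => q.1) then some j
      else wof.get? a := by
  induction p generalizing wof with
  | zero =>
    refine ⟨Nat.le_refl 0, ?_, fun a => ?_⟩
    · rw [show (pvInner desc (s + 125) j 0 wof).1 = 0 from rfl]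
      simp
    · rw [show pvInner desc (s + 125) j 0 wof = (0, wof) from rfl]
      simp
  | succ p ih =>
    have hplt : p < desc.length := hp
    have hqe : desc.getD p (0, 0) = desc[p] := List.getD_eq_getElem desc (0, 0) hplt
    have htake : desc.take (p+1) = desc.take p ++ [desc[p]] := by
      rw [List.take_add_one, List.getElem?_eq_getElem hplt]
      rfl
    simp only [pvInner, hqe]
    by_cases hfit : desc[p].1 + desc[p].2 ≤ s + 125
    · rw [if_pos hfit]
      have hfitb : pvFitb s desc[p] = true := by
        unfold pvFitb
        simpa using hfit
      obtain ⟨ih1, ih2, ih3⟩ := ih (Nat.le_of_lt hplt) (wof.insert desc[p].1 j)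
      refine ⟨Nat.le_trans ih1 (Nat.le_succ p), ?_, ?_⟩
      · rw [ih2, htake, List.filter_append]
        simp [hfitb]
      · intro a
        rw [ih3 a, htake, List.filter_append]
        have hfil : List.filter (pvFitb s) [desc[p]] = [desc[p]] := by simp [hfitb]
        rw [hfil, List.map_append]
        by_cases hmem : a ∈ ((desc.take p).filter (pvFitb s)).map (fun q => q.1)
        · rw [if_pos hmem, if_pos (List.mem_append_left _ hmem)]
        · rw [if_neg hmem]
          by_cases ha : a = desc[p].1
          · subst ha
            rw [if_pos (List.mem_append_right _ (by simp)), PySem.Dict.get?_insert_self]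
          · rw [if_neg (by
                intro hx
                rcases List.mem_append.1 hx with h1 | h1
                · exact hmem h1
                · simp at h1
                  exact ha h1),
              PySem.Dict.get?_insert_of_ne _ _ ha]
    · rw [if_neg hfit]
      have hall : ∀ q ∈ desc.take (p+1), s + 125 < q.1 + q.2 := by
        intro q hqm
        obtain ⟨i, hi, hqi⟩ := List.mem_iff_getElem.1 hqm
        have hip : i ≤ p := by
          simp [List.length_take] at hi
          omega
        have hilen : i < desc.length := by omega
        have hitake : (desc.take (p+1))[i] = desc[i] := List.getElem_take
        rcases Nat.lt_or_ge i p with hlt | hge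
        · have hrel := List.pairwise_iff_getElem.1 hdesc i p hilen hplt hlt
          rw [← hqi, hitake]
          omega
        · have hieq : i = p := Nat.le_antisymm hip hge
          subst hieq
          rw [← hqi, hitake]
          omega
      refine ⟨Nat.le_refl _, ?_, fun a => ?_⟩
      · symm
        rw [List.filter_eq_self]
        intro q hqm
        have := hall q hqm
        unfold pvFitb
        simp
        omega
      · have hnilf : (desc.take (p+1)).filter (pvFitb s) = [] := by
          rw [List.filter_eq_nil_iff]
          intro q hqm
          have := hall q hqm
          unfold pvFitb
          simp
          omega
        rw [hnilf]
        simp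

-- the shape of a window_of lookup after a sweep
def pvOut (o : Option Nat) (base : Option Int) (k : Int) : Option Int :=
  match o with
  | some r => some (k + (r : Int))
  | none => base

theorem pvOut_some (r : Nat) (base : Option Int) (k : Int) :
    pvOut (some r) base k = some (k + (r : Int)) := rfl

theorem pvOut_none (base : Option Int) (k : Int) : pvOut none base k = base := rfl

theorem pv_sweep_spec (desc : List (Int × Int))
    (hdesc : desc.Pairwise (fun a b => b.1 + b.2 ≤ a.1 + a.2))
    (hnd : (desc.map (fun p => p.1)).Nodup)
    (fuel : Nat) (p : Nat) (starts : List Int) (wof : PySem.Dict Int Int)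
    (hp : p ≤ desc.length) :
    (pvSweep desc (desc.foldl pvPrefStep (([], none) : List Int × Option Int)).1 fuel p starts wof).1
      = starts ++ pvChain fuel (desc.take p) ∧
    ∀ a : Int,
      (pvSweep desc (desc.foldl pvPrefStep (([], none) : List Int × Option Int)).1 fuel p starts wof).2.get? a
        = pvOut (pvRoundIdx fuel (desc.take p) a) (wof.get? a) (starts.length : Int) := by
  induction fuel generalizing p starts wof with
  | zero =>
    exact ⟨by simp [pvSweep, pvChain], fun a => by simp [pvSweep, pvRoundIdx, pvOut_none]⟩
  | succ fuel ih =>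
    by_cases hp0 : p = 0
    · subst hp0
      refine ⟨by simp [pvSweep, pvChain, pv_minA_nil], fun a => ?_⟩
      simp [pvSweep, pvRoundIdx, pv_minA_nil, pvOut_none]
    · have hppos : 0 < p := Nat.pos_of_ne_zero hp0
      simp only [pvSweep, if_neg hp0]
      have hmin := pv_prefmin_getD desc p hppos hp
      set s := ((desc.foldl pvPrefStep (([], none) : List Int × Option Int)).1).getD (p-1) 0 with hs
      obtain ⟨hle', htake', hget'⟩ :=
        pv_inner_spec desc hdesc s (((starts ++ [s]).length : Int) - 1) p hp wof
      obtain ⟨ihs, ihg⟩ := ih _ (starts ++ [s]) _ (Nat.le_trans hle' hp)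
      have hchain : pvChain (fuel+1) (desc.take p)
          = s :: pvChain fuel ((desc.take p).filter (fun q => !pvFitb s q)) := by
        simp only [pvChain, hmin]
      have hRI : ∀ a : Int, pvRoundIdx (fuel+1) (desc.take p) a
          = (if a ∈ ((desc.take p).filter (pvFitb s)).map (fun q => q.1) then some 0
             else (pvRoundIdx fuel ((desc.take p).filter (fun q => !pvFitb s q)) a).map (· + 1)) := by
        intro a
        simp only [pvRoundIdx, hmin]
      refine ⟨?_, fun a => ?_⟩
      · rw [ihs, htake', hchain]
        simp
      · rw [ihg a, htake', hRI a]
        by_cases hmem : a ∈ ((desc.take p).filter (pvFitb s)).map (fun q => q.1)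
        · rw [if_pos hmem]
          have hnda : ((desc.take p).map (fun q => q.1)).Nodup :=
            hnd.sublist (List.Sublist.map _ (List.take_sublist _ _))
          have hnotin : a ∉ ((desc.take p).filter (fun q => !pvFitb s q)).map (fun q => q.1) := by
            intro hx
            obtain ⟨q1, hq1, hq1e⟩ := List.mem_map.1 hmem
            obtain ⟨q2, hq2, hq2e⟩ := List.mem_map.1 hx
            have e := List.inj_on_of_nodup_map hnda (List.mem_of_mem_filter hq2)
              (List.mem_of_mem_filter hq1) (by rw [hq1e, hq2e])
            have hf1 := (List.mem_filter.1 hq1).2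
            have hf2 := (List.mem_filter.1 hq2).2
            rw [e, hf1] at hf2
            simp at hf2
          rw [pv_roundIdx_not_mem fuel _ a hnotin, pvOut_none, pvOut_some]
          have h1 := hget' a
          rw [if_pos hmem] at h1
          rw [h1]
          congr 1
          simp
        · rw [if_neg hmem]
          cases hri : pvRoundIdx fuel ((desc.take p).filter (fun q => !pvFitb s q)) a with
          | none =>
            rw [pvOut_none, Option.map_none, pvOut_none]
            have h1 := hget' a
            rw [if_neg hmem] at h1
            exact h1
          | some r =>
            rw [pvOut_some, Option.map_some, pvOut_some]
            congr 1
            simp only [List.length_append, List.length_cons, List.length_nil]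
            push_cast
            ring


-- ---------- B-side: bucketing ----------

theorem pv_bucket_len (wof : PySem.Dict Int Int) (items' : List (Int × Int))
    (gs : List (PySem.Dict Int Int)) :
    (items'.foldl (pvBucketStep wof) gs).length = gs.length := by
  induction items' generalizing gs with
  | nil => rfl
  | cons q t ih =>
    simp only [List.foldl_cons]
    rw [ih]
    simp [pvBucketStep]

theorem pv_bucket (wof : PySem.Dict Int Int) (items' : List (Int × Int))
    (gs : List (PySem.Dict Int Int)) (j : Nat) (hj : j < gs.length) :
    (items'.foldl (pvBucketStep wof) gs).getD j PySem.Dict.empty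
      = (items'.filter (fun q => decide ((wof.getD q.1 0).toNat = j))).foldl
          (fun d q => d.insert q.1 q.2) (gs.getD j PySem.Dict.empty) := by
  induction items' generalizing gs with
  | nil => simp
  | cons q t ih =>
    simp only [List.foldl_cons, List.filter_cons]
    have hstep : pvBucketStep wof gs q
        = gs.set ((wof.getD q.1 0).toNat)
            ((gs.getD ((wof.getD q.1 0).toNat) PySem.Dict.empty).insert q.1 q.2) := rfl
    have hlen : (pvBucketStep wof gs q).length = gs.length := by
      rw [hstep]
      simp
    rw [ih _ (by omega)]
    by_cases hfq : (wof.getD q.1 0).toNat = j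
    · have hv : (pvBucketStep wof gs q).getD j PySem.Dict.empty
          = (gs.getD j PySem.Dict.empty).insert q.1 q.2 := by
        rw [hstep]
        subst hfq
        simp [List.getD_eq_getElem?_getD, hj]
      rw [hv]
      simp [hfq]
    · have hv : (pvBucketStep wof gs q).getD j PySem.Dict.empty = gs.getD j PySem.Dict.empty := by
        rw [hstep]
        simp [List.getD_eq_getElem?_getD, List.getElem?_set_ne (fun h => hfq h)]
      rw [hv]
      simp [hfq]

theorem split_registers_spec : Claim_equal_split_registers := by
  intro registers _hdom hpre
  obtain ⟨hne, hw⟩ := hpre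
  show split_registers registers = split_registers_alt registers
  have hguard : (PySem.Dict.ofList registers).values.any (fun w => decide (125 < w)) = false := by
    rw [List.any_eq_false]
    intro w hwmem
    simp only [PySem.Dict.values] at hwmem
    obtain ⟨pp, hpp, rfl⟩ := List.mem_map.1 hwmem
    have h2 := hw pp hpp
    simp only [decide_eq_true_eq, not_lt]
    omega
  simp only [split_registers, split_registers_alt, hguard, Bool.false_eq_true, if_false]
  have hndk : ((PySem.Dict.ofList registers).items.map (fun p => p.1)).Nodup :=
    PySem.Dict.nodup_keys_ofList registers
  -- A side: the working-copy loop is the rounds recursion, then round j = the j-th filter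
  rw [pv_A_rounds _ _ hndk,
    show (PySem.Dict.ofList registers).size = (PySem.Dict.ofList registers).items.length from rfl]
  generalize hI : (PySem.Dict.ofList registers).items = L at hndk hw ⊢
  set n := L.length with hn_def
  rw [pv_rounds_filter n L hndk]
  -- B side
  set desc := PySem.List.sorted L (fun q => q.1 + q.2) true with hdesc_def
  have hperm : desc.Perm L := PySem.List.sorted_perm L _ true
  have hpair : desc.Pairwise (fun a b => b.1 + b.2 ≤ a.1 + a.2) :=
    PySem.List.sorted_pairwise_rev L _
  have hnddesc : (desc.map (fun p => p.1)).Nodup := ((hperm.map _).nodup_iff).2 hndk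
  have hlen : desc.length = n := hperm.length_eq
  obtain ⟨hstarts, hwof⟩ :=
    pv_sweep_spec desc hpair hnddesc desc.length desc.length [] PySem.Dict.empty (le_refl _)
  rw [List.take_length] at hstarts hwof
  set W := pvSweep desc ((desc.foldl pvPrefStep (([], none) : List Int × Option Int)).1)
      desc.length desc.length [] PySem.Dict.empty with hW_def
  have hchain : pvChain desc.length desc = pvChain n L := by
    rw [pv_chain_perm desc.length hperm, hlen]
  have hstarts' : W.1 = pvChain n L := by
    rw [hstarts, hchain]
    simp
  have hridx : ∀ a, pvRoundIdx desc.length desc a = pvRoundIdx n L a := by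
    intro a
    rw [pv_roundIdx_perm desc.length hperm a, hlen]
  have htot : ∀ q ∈ L, ∃ r, pvRoundIdx n L q.1 = some r ∧ r < (pvChain n L).length :=
    fun q hq => pv_roundIdx_total n L hw (le_refl _) q hq
  have hfval : ∀ q ∈ L, ∀ r, pvRoundIdx n L q.1 = some r →
      (W.2.getD q.1 0).toNat = r := by
    intro q hq r hr
    rw [PySem.Dict.getD_eq_get?_getD, hwof q.1, hridx q.1, hr, pvOut_some]
    simp
  -- bucketing
  apply List.ext_getElem
  · simp only [List.length_map, List.length_range]
    rw [pv_bucket_len]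
    simp [hstarts']
  · intro j h1 h2
    simp only [List.getElem_map, List.getElem_range]
    have hjlt : j < (pvChain n L).length := by simpa using h1
    have hj0 : j < (W.1.map (fun _ => (PySem.Dict.empty : PySem.Dict Int Int))).length := by
      simpa [hstarts'] using hjlt
    have h2' : j < (L.foldl (pvBucketStep W.2) (W.1.map (fun _ => PySem.Dict.empty))).length := by
      rw [pv_bucket_len]
      exact hj0
    have hgd : (L.foldl (pvBucketStep W.2) (W.1.map (fun _ => PySem.Dict.empty)))[j]'h2'
        = (L.foldl (pvBucketStep W.2)
            (W.1.map (fun _ => PySem.Dict.empty))).getD j PySem.Dict.empty :=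
      (List.getD_eq_getElem _ _ h2').symm
    rw [hgd, pv_bucket W.2 L _ j hj0]
    have hg0 : (W.1.map (fun _ => (PySem.Dict.empty : PySem.Dict Int Int))).getD j PySem.Dict.empty
        = PySem.Dict.empty := by
      rw [List.getD_eq_getElem _ _ hj0, List.getElem_map]
    rw [hg0]
    have hfresh : ∀ q ∈ L.filter (fun q => decide ((W.2.getD q.1 0).toNat = j)),
        (PySem.Dict.empty : PySem.Dict Int Int).contains q.1 = false := fun q _ => rfl
    have hndf : ((L.filter (fun q => decide ((W.2.getD q.1 0).toNat = j))).map
        (fun q => q.1)).Nodup := hndk.sublist (List.Sublist.map _ List.filter_sublist)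
    have hins := PySem.Dict.items_foldl_insert_fresh
      (L.filter (fun q => decide ((W.2.getD q.1 0).toNat = j))) (fun q => q.1) (fun q => q.2)
      PySem.Dict.empty hfresh hndf
    rw [hins]
    have hmapid : (L.filter (fun q => decide ((W.2.getD q.1 0).toNat = j))).map
        (fun q => (q.1, q.2)) = L.filter (fun q => decide ((W.2.getD q.1 0).toNat = j)) := by
      simp
    rw [hmapid,
      show (PySem.Dict.empty : PySem.Dict Int Int).items = [] from rfl, List.nil_append]
    apply List.filter_congr
    intro q hq
    obtain ⟨r, hr, _⟩ := htot q hq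
    rw [hr, hfval q hq r hr]
    simp
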